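-- pv_equiv track=rewrite | github.com/Valdecy/ga_scheduler | ga_scheduler/algorithm/src.py | calculate_idle_times
-- ===== SOURCE A (Python) =====
-- def calculate_idle_times(schedule_matrix):
--     total_idle_time = 0
--     for row in schedule_matrix:
--         row_idle_time  = 0
--         last_job_index = None
--         for i in range(len(row) - 1, -1, -1):
--             if (row[i] != ''):
--                 last_job_index = i
--                 break
--         if (last_job_index is not None):
--             for i in range(0, last_job_index):
--                 if (row[i] == ''):
--                     row_idle_time =  row_idle_time  + 1
--         total_idle_time = total_idle_time + row_idle_time
--     return total_idle_time
-- ===== SOURCE B (Python) =====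
-- def calculate_idle_times(schedule_matrix):
--     total = 0
--     for row in schedule_matrix:
--         empties = row.count('')
--         trailing = 0
--         for cell in reversed(row):
--             if cell != '':
--                 break
--             trailing += 1
--         total += empties - trailing
--     return total
-- ===== Notes on version B (the rewrite author's own statement) =====
-- stated objective: simpler
-- what changed: Replaces A's find-last-job-index-then-count-prefix-empties per row by counting all empty cells and subtracting the trailing run of empties, dropping the last_job_index bookkeeping.
import Mathlib
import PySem

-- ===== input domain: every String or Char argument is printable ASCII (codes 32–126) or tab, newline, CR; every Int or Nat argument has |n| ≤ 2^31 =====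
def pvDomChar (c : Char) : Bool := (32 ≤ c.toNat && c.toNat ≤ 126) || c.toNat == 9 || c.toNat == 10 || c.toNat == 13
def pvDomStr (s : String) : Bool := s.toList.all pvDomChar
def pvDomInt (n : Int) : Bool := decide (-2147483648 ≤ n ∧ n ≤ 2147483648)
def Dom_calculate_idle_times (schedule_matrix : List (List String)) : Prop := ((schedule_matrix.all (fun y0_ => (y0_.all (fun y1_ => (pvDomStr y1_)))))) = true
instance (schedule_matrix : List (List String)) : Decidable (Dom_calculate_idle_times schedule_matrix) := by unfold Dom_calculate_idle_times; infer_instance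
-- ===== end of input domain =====

-- B replaces A's "find last job index, then count prefix empties" per row by
-- "count all empty cells minus the trailing run of empties" (objective: simpler).

-- ===== PORT A =====
-- 'for i in range(len(row)-1, -1, -1): if row[i] != "": last_job_index = i; break'
-- transliterated as recursion on the scan index (argument n is the number of cells
-- still to inspect; the cell inspected is index n-1; every index is in range, so
-- List.getD is exact here).
def pvLastJob (row : List String) : Nat → Option Nat
  | 0 => none
  | n + 1 => if row.getD n "" ≠ "" then some n else pvLastJob row n

-- 'for i in range(0, last_job_index): if row[i] == "": row_idle_time += 1'
-- (range(0, k) with k ≥ 0 is List.range k; indices are in range, getD is exact).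
def pvCountEmptyBefore (row : List String) (k : Nat) : Int :=
  (List.range k).foldl (fun acc i => if row.getD i "" = "" then acc + 1 else acc) 0

def calculate_idle_times (schedule_matrix : List (List String)) : Int :=
  schedule_matrix.foldl
    (fun total_idle_time row =>
      let row_idle_time : Int :=
        match pvLastJob row row.length with
        | none => 0
        | some k => pvCountEmptyBefore row k
      total_idle_time + row_idle_time)
    0

-- ===== PORT B =====
-- 'for cell in reversed(row): if cell != "": break; trailing += 1'
def pvTrailing : List String → Int
  | [] => 0
  | c :: rest => if c ≠ "" then 0 else 1 + pvTrailing rest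

def calculate_idle_times_alt (schedule_matrix : List (List String)) : Int :=
  schedule_matrix.foldl
    (fun total row =>
      total + ((PySem.List.count row "" : Int) - pvTrailing row.reverse))
    0

-- ===== PRECONDITION & SPEC =====
def Spec_calculate_idle_times (schedule_matrix : List (List String)) (out : Int) : Prop := out = calculate_idle_times_alt schedule_matrix
instance (schedule_matrix : List (List String)) (out : Int) : Decidable (Spec_calculate_idle_times schedule_matrix out) := by unfold Spec_calculate_idle_times; infer_instance

-- ===== CLAIM (what is proved, stated in full; the proofs are below) =====
def Claim_equal_calculate_idle_times : Prop := ∀ (schedule_matrix : List (List String)), Dom_calculate_idle_times schedule_matrix → Spec_calculate_idle_times schedule_matrix (calculate_idle_times schedule_matrix)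

-- ===== LEMMAS AND PROOFS =====

theorem pvLastJob_lt (row : List String) (n k : Nat) (h : pvLastJob row n = some k) : k < n := by
  induction n with
  | zero => simp [pvLastJob] at h
  | succ n ih =>
    simp only [pvLastJob] at h
    split at h
    · cases h; omega
    · exact Nat.lt_succ_of_lt (ih h)

theorem pvLastJob_concat_le (row : List String) (x : String) (n : Nat) (h : n ≤ row.length) :
    pvLastJob (row ++ [x]) n = pvLastJob row n := by
  induction n with
  | zero => rfl
  | succ n ih =>
    simp only [pvLastJob]
    rw [List.getD_append _ _ _ _ (by omega), ih (by omega)]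

theorem pvCountEmptyBefore_succ (row : List String) (k : Nat) :
    pvCountEmptyBefore row (k + 1) =
      if row.getD k "" = "" then pvCountEmptyBefore row k + 1 else pvCountEmptyBefore row k := by
  simp only [pvCountEmptyBefore, List.range_succ, List.foldl_append, List.foldl_cons, List.foldl_nil]

theorem pvCountEmptyBefore_concat_le (row : List String) (x : String) (k : Nat) (h : k ≤ row.length) :
    pvCountEmptyBefore (row ++ [x]) k = pvCountEmptyBefore row k := by
  induction k with
  | zero => rfl
  | succ k ih =>
    rw [pvCountEmptyBefore_succ, pvCountEmptyBefore_succ,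
      List.getD_append _ _ _ _ (by omega), ih (by omega)]

theorem pvGetD_concat_length (row : List String) (x : String) :
    (row ++ [x]).getD row.length "" = x := by
  induction row with
  | nil => rfl
  | cons y ys ih => simp

theorem pvCountEmptyBefore_length (row : List String) :
    pvCountEmptyBefore row row.length = (row.count "" : Int) := by
  induction row using List.reverseRecOn with
  | nil => rfl
  | append_singleton ys x ih =>
    rw [List.length_append, List.length_singleton, pvCountEmptyBefore_succ,
      pvGetD_concat_length, pvCountEmptyBefore_concat_le ys x ys.length le_rfl, ih]
    by_cases hx : x = ""
    · simp [hx, List.count_append]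
    · simp [hx, List.count_append]

-- per-row equality: A's row idle time = B's row idle time
theorem pv_row_eq (row : List String) :
    (match pvLastJob row row.length with
      | none => (0 : Int)
      | some k => pvCountEmptyBefore row k)
    = (PySem.List.count row "" : Int) - pvTrailing row.reverse := by
  induction row using List.reverseRecOn with
  | nil => rfl
  | append_singleton ys x ih =>
    have hlen : (ys ++ [x]).length = ys.length + 1 := by simp
    rw [hlen]
    by_cases hx : x = ""
    · subst hx
      have h1 : pvLastJob (ys ++ [""]) (ys.length + 1) = pvLastJob ys ys.length := by
        simp only [pvLastJob, pvGetD_concat_length]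
        simp [pvLastJob_concat_le ys "" ys.length le_rfl]
      rw [h1]
      have hrhs : (PySem.List.count (ys ++ [""]) "" : Int) - pvTrailing (ys ++ [""]).reverse
          = (PySem.List.count ys "" : Int) - pvTrailing ys.reverse := by
        simp only [PySem.List.count, List.count_append, List.reverse_append,
          List.reverse_singleton, List.singleton_append, pvTrailing]
        simp
        ring
      rw [hrhs, ← ih]
      cases h : pvLastJob ys ys.length with
      | none => simp
      | some k =>
        have hk : k < ys.length := pvLastJob_lt ys ys.length k h
        simp only []
        exact pvCountEmptyBefore_concat_le ys "" k (by omega)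
    · have h1 : pvLastJob (ys ++ [x]) (ys.length + 1) = some ys.length := by
        simp [pvLastJob, hx]
      rw [h1]
      simp only []
      rw [pvCountEmptyBefore_concat_le ys x ys.length le_rfl, pvCountEmptyBefore_length]
      simp only [PySem.List.count, List.count_append, List.reverse_append,
        List.reverse_singleton, List.singleton_append, pvTrailing]
      simp [hx]

theorem pv_foldl_eq (sm : List (List String)) (a : Int) :
    sm.foldl
      (fun total_idle_time row =>
        let row_idle_time : Int :=
          match pvLastJob row row.length with
          | none => 0
          | some k => pvCountEmptyBefore row k
        total_idle_time + row_idle_time) a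
    = sm.foldl (fun total row => total + ((PySem.List.count row "" : Int) - pvTrailing row.reverse)) a := by
  induction sm generalizing a with
  | nil => rfl
  | cons r rs ih => simp only [List.foldl_cons, pv_row_eq r]; exact ih _

-- ===== VERDICT (by name: the statement is the Claim_ definition above) =====
theorem calculate_idle_times_spec : Claim_equal_calculate_idle_times := by
  intro sm _
  unfold Spec_calculate_idle_times calculate_idle_times calculate_idle_times_alt
  exact pv_foldl_eq sm 0
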